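-- pv_equiv track=rewrite | github.com/AnchalNigam/Code-Time | password.py | minPasswordLen
-- ===== SOURCE A (Python) =====
-- def minPasswordLen(password):
--   idx = 0
--   while idx < len(password)-1:
--     if password[idx] != password[idx+1]:
--       password[idx+1] = password[idx]+password[idx+1]
--       del password[idx]
--
--     else:
--       idx += 1
--   idx = len(password)-1
--   while idx > 0:
--     if password[idx] != password[idx-1]:
--       password[idx-1] = password[idx]+password[idx-1]
--       del password[idx]
--     idx -= 1
--
--   return len(password)
-- ===== SOURCE B (Python) =====
-- def minPasswordLen(password):
--     # Single accumulator sweep forward, then a right-to-left pending fold;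
--     # also writes the merged list back into password like A does.
--     if not password:
--         return 0
--     out = []
--     cur = password[0]
--     for x in password[1:]:
--         if cur != x:
--             cur = cur + x
--         else:
--             out.append(cur)
--             cur = x
--     # reverse pass over out, pending starts at the final cur
--     final = []
--     pending = cur
--     for left in reversed(out):
--         if pending != left:
--             pending = pending + left
--         else:
--             final.append(pending)
--             pending = left
--     final.append(pending)
--     final.reverse()
--     password[:] = final
--     return len(final)
-- ===== Notes on version B (the rewrite author's own statement) =====
-- stated objective: faster
-- what changed: Replaced A's two index-and-delete cascades over a mutating list with two accumulator sweeps (a forward fold building emitted blocks plus a current block, then the same fold over the reversed blocks), writing the result back once.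
import Mathlib
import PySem

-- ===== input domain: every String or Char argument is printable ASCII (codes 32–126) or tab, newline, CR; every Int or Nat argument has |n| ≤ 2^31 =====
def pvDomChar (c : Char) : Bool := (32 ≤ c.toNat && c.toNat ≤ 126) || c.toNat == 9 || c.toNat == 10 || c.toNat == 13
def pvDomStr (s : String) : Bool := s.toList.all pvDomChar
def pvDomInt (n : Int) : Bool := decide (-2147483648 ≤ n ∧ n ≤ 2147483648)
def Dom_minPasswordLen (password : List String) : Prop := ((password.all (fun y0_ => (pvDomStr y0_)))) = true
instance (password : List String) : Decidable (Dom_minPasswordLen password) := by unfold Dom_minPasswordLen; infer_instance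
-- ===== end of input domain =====

-- B is a different decomposition (two accumulator folds instead of A's index/delete cascades);
-- equivalence is about the RETURN value; the Python B performs the same in-place mutation as A.

-- ===== PORT A =====
-- A's first while loop: at position idx, if the element differs from its right
-- neighbour they are merged (left++right) and the merged element is re-examined
-- against the next; on equality idx advances.  As a recursion on the list:
def pvStepA : List String → List String
  | [] => []
  | [x] => [x]
  | x :: y :: rest =>
    if x ≠ y then pvStepA ((x ++ y) :: rest)
    else x :: pvStepA (y :: rest)
termination_by l => l.length
decreasing_by all_goals simp

-- A's second while loop walks from the right end: password[idx] is merged into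
-- password[idx-1] as password[idx]++password[idx-1] when they differ, and idx
-- always moves left — which is exactly pvStepA run on the reversed list.
def minPasswordLen (password : List String) : Int :=
  let afterFirst := pvStepA password
  let afterSecond := (pvStepA afterFirst.reverse).reverse
  (afterSecond.length : Int)

-- ===== PORT B =====
-- one fold step shared by both sweeps of Source B: state = (emitted blocks, current block)
def pvMerge (acc : List String × String) (x : String) : List String × String :=
  if acc.2 ≠ x then (acc.1, acc.2 ++ x) else (acc.1 ++ [acc.2], x)

def minPasswordLen_alt (password : List String) : Int :=
  match password with
  | [] => 0
  | p0 :: rest =>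
    let fwd := rest.foldl pvMerge ([], p0)         -- out, cur
    let bwd := fwd.1.reverse.foldl pvMerge ([], fwd.2)  -- final (reversed), pending
    let final := (bwd.1 ++ [bwd.2]).reverse
    (final.length : Int)

-- ===== PRECONDITION & SPEC =====
def Spec_minPasswordLen (password : List String) (out : Int) : Prop := out = minPasswordLen_alt password
instance (password : List String) (out : Int) : Decidable (Spec_minPasswordLen password out) := by unfold Spec_minPasswordLen; infer_instance

-- ===== CLAIM (what is proved, stated in full; the proofs are below) =====
def Claim_equal_minPasswordLen : Prop := ∀ (password : List String), Dom_minPasswordLen password → Spec_minPasswordLen password (minPasswordLen password)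

-- ===== LEMMAS AND PROOFS =====

-- The accumulator fold computes pvStepA: emitted blocks ++ [current block].
theorem pvMerge_foldl (rest : List String) : ∀ (cur : String) (acc : List String),
    acc ++ pvStepA (cur :: rest)
      = (rest.foldl pvMerge (acc, cur)).1 ++ [(rest.foldl pvMerge (acc, cur)).2] := by
  induction rest with
  | nil => intro cur acc; simp [pvStepA]
  | cons x t ih =>
    intro cur acc
    by_cases h : cur = x
    · subst h
      simp [pvStepA, List.foldl, pvMerge]
      have := ih cur (acc ++ [cur])
      simpa using this
    · simp [pvStepA, h, List.foldl, pvMerge]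
      exact ih (cur ++ x) acc

theorem minPasswordLen_eq_alt (password : List String) :
    minPasswordLen password = minPasswordLen_alt password := by
  cases password with
  | nil => simp [minPasswordLen, minPasswordLen_alt, pvStepA]
  | cons p0 rest =>
    simp only [minPasswordLen, minPasswordLen_alt]
    have h1 := pvMerge_foldl rest p0 []
    simp only [List.nil_append] at h1
    set fwd := rest.foldl pvMerge ([], p0) with hfwd
    have hrev : (pvStepA (p0 :: rest)).reverse = fwd.2 :: fwd.1.reverse := by
      rw [h1]; simp
    have h2 := pvMerge_foldl fwd.1.reverse fwd.2 []
    simp only [List.nil_append] at h2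
    rw [hrev, h2]

-- ===== VERDICT (by name: the statement is the Claim_ definition above) =====
theorem minPasswordLen_spec : Claim_equal_minPasswordLen := by
  intro password _
  unfold Spec_minPasswordLen
  exact minPasswordLen_eq_alt password
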